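-- pv_equiv track=rewrite | github.com/clp-research/modular_form_filling_with_llm | eval/create_scores.py | repetition_count
-- ===== SOURCE A (Python) =====
-- def repetition_count(dialogue):
--     """counts how often a question has been repeated by the system.
--
--     Args:
--         dialogue (list): each list entry is a dict with either "Assistant" or "User" as a key.
--
--     Returns:
--         int: number of repeated questions
--     """
--     reps = 0
--     said = []
--     for entry in dialogue:
--         if "Assistant" in entry.keys():
--             if entry["Assistant"] in said:
--                 reps += 1
--             else:
--                 said.append(entry["Assistant"])
--     return reps
-- ===== SOURCE B (Python) =====
-- def repetition_count(dialogue):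
--     """counts how often a question has been repeated by the system."""
--     qs = [entry["Assistant"] for entry in dialogue if "Assistant" in entry]
--     return len(qs) - len(set(qs))
-- ===== Notes on version B (the rewrite author's own statement) =====
-- stated objective: simpler
-- what changed: Replaces the incremental seen-list membership loop with a one-line tally: collect all assistant questions, then return total count minus number of distinct ones.
import Mathlib
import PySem

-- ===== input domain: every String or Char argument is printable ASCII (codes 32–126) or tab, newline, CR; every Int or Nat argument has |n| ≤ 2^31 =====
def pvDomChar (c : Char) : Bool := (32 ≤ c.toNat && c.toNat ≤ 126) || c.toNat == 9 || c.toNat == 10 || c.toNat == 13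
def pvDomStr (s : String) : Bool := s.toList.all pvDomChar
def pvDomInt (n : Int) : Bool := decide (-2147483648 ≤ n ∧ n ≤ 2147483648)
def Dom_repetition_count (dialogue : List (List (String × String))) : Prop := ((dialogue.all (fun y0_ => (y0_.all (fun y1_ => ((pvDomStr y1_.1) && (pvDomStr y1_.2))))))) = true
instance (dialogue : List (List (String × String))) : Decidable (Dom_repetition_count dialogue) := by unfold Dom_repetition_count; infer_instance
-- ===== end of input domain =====

-- B replaces A's incremental seen-list loop by "total assistant questions minus distinct ones" (simpler).
-- ===== PORT A =====
-- dicts are association lists; "Assistant" in entry.keys() = key membership, entry["Assistant"] = first match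
def repetition_count (dialogue : List (List (String × String))) : Int :=
  (dialogue.foldl
    (fun (st : Int × List String) entry =>
      if (entry.map Prod.fst).contains "Assistant" then
        let q := (entry.lookup "Assistant").getD ""
        if st.2.contains q then (st.1 + 1, st.2) else (st.1, st.2 ++ [q])
      else st)
    (0, [])).1

-- ===== PORT B =====
def repetition_count_alt (dialogue : List (List (String × String))) : Int :=
  let qs := dialogue.filterMap (fun entry => entry.lookup "Assistant")
  (qs.length : Int) - ((PySem.Set.ofList qs).length : Int)

-- ===== PRECONDITION & SPEC =====
def Spec_repetition_count (dialogue : List (List (String × String))) (out : Int) : Prop := out = repetition_count_alt dialogue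
instance (dialogue : List (List (String × String))) (out : Int) : Decidable (Spec_repetition_count dialogue out) := by unfold Spec_repetition_count; infer_instance

-- ===== CLAIM (what is proved, stated in full; the proofs are below) =====
def Claim_equal_repetition_count : Prop := ∀ (dialogue : List (List (String × String))), Dom_repetition_count dialogue → Spec_repetition_count dialogue (repetition_count dialogue)

-- ===== LEMMAS AND PROOFS =====

-- key membership in an assoc list = lookup succeeds
theorem rc_contains_iff_lookup (entry : List (String × String)) :
    (entry.map Prod.fst).contains "Assistant" = (entry.lookup "Assistant").isSome := by
  induction entry with
  | nil => rfl
  | cons p rest ih =>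
      rw [List.map_cons, List.contains_cons, List.lookup, BEq.comm]
      cases hb : (p.1 == "Assistant") <;> simp_all

-- A's loop over the dialogue equals the same loop over the extracted question list
theorem rc_fold_filterMap (dialogue : List (List (String × String))) (st : Int × List String) :
    dialogue.foldl
      (fun (st : Int × List String) entry =>
        if (entry.map Prod.fst).contains "Assistant" then
          let q := (entry.lookup "Assistant").getD ""
          if st.2.contains q then (st.1 + 1, st.2) else (st.1, st.2 ++ [q])
        else st) st
    = (dialogue.filterMap (fun entry => entry.lookup "Assistant")).foldl
        (fun (st : Int × List String) q =>
          if st.2.contains q then (st.1 + 1, st.2) else (st.1, st.2 ++ [q])) st := by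
  induction dialogue generalizing st with
  | nil => rfl
  | cons entry rest ih =>
      simp only [List.foldl_cons, List.filterMap_cons]
      rw [rc_contains_iff_lookup]
      cases h : entry.lookup "Assistant" with
      | none => simpa [h] using ih st
      | some q => simpa [h] using ih _

-- invariant of the question loop: result = start + #questions - #newly seen distinct questions
theorem rc_loop_closed (qs : List String) : ∀ (r : Int) (s : List String),
    ((qs.foldl
      (fun (st : Int × List String) q =>
        if st.2.contains q then (st.1 + 1, st.2) else (st.1, st.2 ++ [q])) (r, s)).1 : Int)
    = r + (qs.length : Int) - (((qs.foldl PySem.Set.add s).length : Int) - (s.length : Int)) := by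
  induction qs with
  | nil => intro r s; simp
  | cons q rest ih =>
      intro r s
      simp only [List.foldl_cons, PySem.Set.add, PySem.Set.contains, List.length_cons]
      by_cases h : s.contains q
      · simp only [h, if_true]
        rw [ih (r + 1) s]; push_cast; ring
      · simp only [h, Bool.false_eq_true, if_false]
        rw [ih r (s ++ [q])]
        simp only [List.length_append, List.length_cons, List.length_nil]
        push_cast; ring

-- ===== VERDICT (by name: the statement is the Claim_ definition above) =====
theorem repetition_count_spec : Claim_equal_repetition_count := by
  intro dialogue _
  show repetition_count dialogue = repetition_count_alt dialogue
  unfold repetition_count repetition_count_alt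
  rw [rc_fold_filterMap, rc_loop_closed]
  show _ = ((_ : List String).length : Int) - ((PySem.Set.ofList _).length : Int)
  rw [PySem.Set.ofList_eq_foldl]
  simp
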